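-- pv_equiv track=rewrite | github.com/mattmre/AGENT33 | engine/src/agent33/skills/slash_commands.py | parse_slash_command
-- ===== SOURCE A (Python) =====
-- def parse_slash_command(
--     text: str,
--     commands: dict[str, str],
-- ) -> tuple[str, str] | None:
--     """Parse user text for a leading slash-command.
--
--     Returns ``(skill_name, remaining_instruction)`` when a match is found,
--     or ``None`` when the text does not start with a registered command.
--
--     When multiple commands share a prefix (e.g. ``/deploy`` and
--     ``/deploy-k8s``), the longest matching command wins.
--     """
--     text = text.strip()
--     if not text.startswith("/"):
--         return None
--
--     # Sort by length descending so the longest (most specific) command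
--     # is tried first.
--     for cmd in sorted(commands.keys(), key=len, reverse=True):
--         if text == cmd or text.startswith(cmd + " "):
--             instruction = text[len(cmd) :].strip()
--             return (commands[cmd], instruction)
--
--     return None
-- ===== SOURCE B (Python) =====
-- def parse_slash_command(
--     text: str,
--     commands: dict[str, str],
-- ) -> tuple[str, str] | None:
--     """Single pass over commands.items(): keep the longest matching command."""
--     text = text.strip()
--     if not text.startswith("/"):
--         return None
--
--     best_cmd = None
--     best_skill = None
--     for cmd, skill in commands.items():
--         if (text == cmd or text.startswith(cmd + " ")) and (
--             best_cmd is None or len(cmd) > len(best_cmd)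
--         ):
--             best_cmd, best_skill = cmd, skill
--
--     if best_cmd is None:
--         return None
--     return (best_skill, text[len(best_cmd):].strip())
-- ===== Notes on version B (the rewrite author's own statement) =====
-- stated objective: simpler
-- what changed: A sorts all command keys by length descending and returns the first match plus a dict lookup; B makes one unsorted pass over commands.items() keeping a running longest match (no sort, no second lookup), correct because two distinct commands of equal length cannot both match the same text.
import Mathlib
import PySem

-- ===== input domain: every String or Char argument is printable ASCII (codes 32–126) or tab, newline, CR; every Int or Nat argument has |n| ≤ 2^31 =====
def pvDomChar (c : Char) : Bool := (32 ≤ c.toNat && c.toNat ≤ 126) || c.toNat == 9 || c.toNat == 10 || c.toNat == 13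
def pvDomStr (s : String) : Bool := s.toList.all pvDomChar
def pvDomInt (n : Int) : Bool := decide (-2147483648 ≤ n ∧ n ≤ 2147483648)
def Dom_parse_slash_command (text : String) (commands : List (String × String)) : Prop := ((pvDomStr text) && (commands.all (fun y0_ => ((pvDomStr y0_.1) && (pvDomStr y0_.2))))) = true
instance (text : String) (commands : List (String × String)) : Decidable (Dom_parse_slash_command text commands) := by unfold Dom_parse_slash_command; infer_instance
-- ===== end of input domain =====

-- B replaces A's length-descending sort + first-match scan + dict lookup by one unsorted pass
-- keeping a running longest match (objective: simpler).

-- ===== PORT A =====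
-- the shared one-line match test 'text == cmd or text.startswith(cmd + " ")', on code points
def pvMatch (t : List Char) (cmd : List Char) : Bool :=
  t == cmd || PySem.Chars.startswith t (cmd ++ [' '])

-- A's 'for cmd in sorted(...)' loop; 'commands[cmd]' is first-match lookup on the assoc list
def pvLoopA (t : List Char) (commands : List (String × String)) : List String → Option (String × String)
  | [] => none
  | cmd :: rest =>
    if pvMatch t cmd.toList then
      match commands.find? (fun p => p.1 == cmd) with
      | some p => some (p.2, String.ofList (PySem.Chars.strip (PySem.List.slice t (some (cmd.toList.length : Int)) none)))
      | none => none   -- Python's KeyError; unreachable, cmd is drawn from commands' keys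
    else pvLoopA t commands rest

def parse_slash_command (text : String) (commands : List (String × String)) : Option (String × String) :=
  let t := PySem.Chars.strip text.toList
  if !PySem.Chars.startswith t ['/'] then none
  else pvLoopA t commands
    (PySem.List.sorted (commands.map (fun p => p.1)) (fun c => PySem.Str.len c) true)

-- ===== PORT B =====
-- one step of B's loop: take this pair iff it matches and is strictly longer than the best so far
def pvBest (t : List Char) (acc : Option (String × String)) (p : String × String) : Option (String × String) :=
  if pvMatch t p.1.toList &&
      (match acc with | none => true | some b => decide (b.1.toList.length < p.1.toList.length)) then
    some p
  else acc

def parse_slash_command_alt (text : String) (commands : List (String × String)) : Option (String × String) :=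
  let t := PySem.Chars.strip text.toList
  if !PySem.Chars.startswith t ['/'] then none
  else
    match commands.foldl (pvBest t) none with
    | none => none
    | some b => some (b.2, String.ofList (PySem.Chars.strip (PySem.List.slice t (some (b.1.toList.length : Int)) none)))

-- ===== PRECONDITION & SPEC =====
def Spec_parse_slash_command (text : String) (commands : List (String × String)) (out : Option (String × String)) : Prop := out = parse_slash_command_alt text commands
instance (text : String) (commands : List (String × String)) (out : Option (String × String)) : Decidable (Spec_parse_slash_command text commands out) := by unfold Spec_parse_slash_command; infer_instance

-- ===== CLAIM (what is proved, stated in full; the proofs are below) =====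
def Claim_equal_parse_slash_command : Prop := ∀ (text : String) (commands : List (String × String)), Dom_parse_slash_command text commands → Spec_parse_slash_command text commands (parse_slash_command text commands)

-- ===== LEMMAS AND PROOFS =====

-- a matching command is a prefix of the text
theorem pvMatch_prefix (t c : List Char) (h : pvMatch t c = true) : c <+: t := by
  unfold pvMatch at h
  rcases Bool.or_eq_true_iff.mp h with h | h
  · exact (beq_iff_eq.mp h).symm ▸ List.prefix_refl c
  · exact List.IsPrefix.trans ⟨[' '], rfl⟩ ((PySem.Chars.startswith_iff t (c ++ [' '])).mp h)

-- two matching commands of equal length are the same string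
theorem pvMatch_unique {t : List Char} {c₁ c₂ : String}
    (h₁ : pvMatch t c₁.toList = true) (h₂ : pvMatch t c₂.toList = true)
    (hl : c₁.toList.length = c₂.toList.length) : c₁ = c₂ := by
  apply String.toList_inj.mp
  rw [List.prefix_iff_eq_take.mp (pvMatch_prefix t _ h₁),
      List.prefix_iff_eq_take.mp (pvMatch_prefix t _ h₂), hl]

theorem pvBest_none (t : List Char) (p : String × String) :
    pvBest t none p = if pvMatch t p.1.toList = true then some p else none := by
  simp [pvBest]

theorem pvBest_some (t : List Char) (b p : String × String) :
    pvBest t (some b) p =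
      if pvMatch t p.1.toList = true ∧ b.1.toList.length < p.1.toList.length then some p
      else some b := by
  simp [pvBest, Bool.and_eq_true]

-- invariant characterising B's fold result
def pvBOk (t : List Char) (l : List (String × String)) : Option (String × String) → Prop
  | none => ∀ p ∈ l, pvMatch t p.1.toList = false
  | some b => pvMatch t b.1.toList = true ∧
      (∀ p ∈ l, pvMatch t p.1.toList = true → p.1.toList.length ≤ b.1.toList.length) ∧
      l.find? (fun p => p.1 == b.1) = some b

theorem pvBOk_foldl (t : List Char) (l : List (String × String)) :
    pvBOk t l (l.foldl (pvBest t) none) := by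
  induction l using List.reverseRecOn with
  | nil => intro p hp; simp at hp
  | append_singleton l p ih =>
    rw [List.foldl_append, List.foldl_cons, List.foldl_nil]
    cases hOld : l.foldl (pvBest t) none with
    | none =>
      rw [hOld] at ih
      rw [pvBest_none]
      by_cases hm : pvMatch t p.1.toList = true
      · rw [if_pos hm]
        refine ⟨hm, ?_, ?_⟩
        · intro q hq hqm
          rcases List.mem_append.mp hq with hq | hq
          · exact absurd hqm (by simp [ih q hq])
          · simp only [List.mem_singleton] at hq; rw [hq]
        · have hnone : l.find? (fun q => q.1 == p.1) = none := by
            rw [List.find?_eq_none]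
            intro q hq hqe
            have hq1 : q.1 = p.1 := by simpa using hqe
            have hf := ih q hq
            rw [hq1] at hf
            simp [hf] at hm
          rw [List.find?_append, hnone]
          simp [List.find?]
      · rw [if_neg hm]
        intro q hq
        rcases List.mem_append.mp hq with hq | hq
        · exact ih q hq
        · simp only [List.mem_singleton] at hq; rw [hq]
          simpa using hm
    | some b =>
      rw [hOld] at ih
      obtain ⟨hbm, hbmax, hbfind⟩ := ih
      rw [pvBest_some]
      by_cases hupd : pvMatch t p.1.toList = true ∧ b.1.toList.length < p.1.toList.length
      · obtain ⟨hm, hlt⟩ := hupd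
        rw [if_pos ⟨hm, hlt⟩]
        refine ⟨hm, ?_, ?_⟩
        · intro q hq hqm
          rcases List.mem_append.mp hq with hq | hq
          · exact le_trans (hbmax q hq hqm) (le_of_lt hlt)
          · simp only [List.mem_singleton] at hq; rw [hq]
        · have hnone : l.find? (fun q => q.1 == p.1) = none := by
            rw [List.find?_eq_none]
            intro q hq hqe
            have hq1 : q.1 = p.1 := by simpa using hqe
            have hqm : pvMatch t q.1.toList = true := by rw [hq1]; exact hm
            have := hbmax q hq hqm
            rw [hq1] at this
            omega
          rw [List.find?_append, hnone]
          simp [List.find?]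
      · rw [if_neg hupd]
        refine ⟨hbm, ?_, ?_⟩
        · intro q hq hqm
          rcases List.mem_append.mp hq with hq | hq
          · exact hbmax q hq hqm
          · simp only [List.mem_singleton] at hq; subst hq
            by_cases hlt : b.1.toList.length < q.1.toList.length
            · exact absurd ⟨hqm, hlt⟩ hupd
            · omega
        · rw [List.find?_append, hbfind]; rfl

-- A's loop returns none when nothing in the key list matches
theorem pvLoopA_none (t : List Char) (commands : List (String × String)) (L : List String)
    (h : ∀ c ∈ L, pvMatch t c.toList = false) : pvLoopA t commands L = none := by
  induction L with
  | nil => rfl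
  | cons c rest ih =>
    simp only [pvLoopA]
    rw [if_neg (by simp [h c List.mem_cons_self])]
    exact ih (fun c' hc' => h c' (List.mem_cons_of_mem c hc'))

-- A's loop stops at the first matching key
theorem pvLoopA_first (t : List Char) (commands : List (String × String))
    (as bs : List String) (cmd : String)
    (ha : ∀ c ∈ as, pvMatch t c.toList = false) (hm : pvMatch t cmd.toList = true) :
    pvLoopA t commands (as ++ cmd :: bs) =
      (match commands.find? (fun p => p.1 == cmd) with
       | some p => some (p.2, String.ofList (PySem.Chars.strip (PySem.List.slice t (some (cmd.toList.length : Int)) none)))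
       | none => none) := by
  induction as with
  | nil =>
    rw [List.nil_append]
    simp only [pvLoopA]
    rw [if_pos hm]
  | cons a as ih =>
    rw [List.cons_append]
    simp only [pvLoopA]
    rw [if_neg (by simp [ha a List.mem_cons_self])]
    exact ih (fun c hc => ha c (List.mem_cons_of_mem a hc))

-- ===== VERDICT (by name: the statement is the Claim_ definition above) =====
theorem parse_slash_command_spec : Claim_equal_parse_slash_command := by
  intro text commands _
  unfold Spec_parse_slash_command parse_slash_command parse_slash_command_alt
  set t := PySem.Chars.strip text.toList with ht
  by_cases hs : PySem.Chars.startswith t ['/'] = true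
  · have h1 : (!PySem.Chars.startswith t ['/']) = false := by simp [hs]
    simp only [h1, Bool.false_eq_true, if_false]
    have hB := pvBOk_foldl t commands
    cases hF : commands.foldl (pvBest t) none with
    | none =>
      rw [hF] at hB
      apply pvLoopA_none
      intro c hc
      rcases List.mem_map.mp ((PySem.List.mem_sorted _ _ _ c).mp hc) with ⟨p, hp, hpc⟩
      rw [← hpc]; exact hB p hp
    | some b =>
      rw [hF] at hB
      obtain ⟨hbm, hbmax, hbfind⟩ := hB
      -- b.1 is in the sorted key list
      have hbmem : b.1 ∈ PySem.List.sorted (commands.map (fun p => p.1)) (fun c => PySem.Str.len c) true := by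
        rw [PySem.List.mem_sorted]
        exact List.mem_map.mpr ⟨b, List.mem_of_find?_eq_some hbfind, rfl⟩
      -- the sorted list has a first match cmd0
      have hex : ((PySem.List.sorted (commands.map (fun p => p.1)) (fun c => PySem.Str.len c) true).find?
          (fun c => pvMatch t c.toList)).isSome = true :=
        List.find?_isSome.mpr ⟨b.1, hbmem, hbm⟩
      obtain ⟨cmd0, hc0⟩ := Option.isSome_iff_exists.mp hex
      obtain ⟨hc0m, as, bs, hLeq, hpre⟩ := List.find?_eq_some_iff_append.mp hc0
      -- cmd0 has maximal length, hence cmd0 = b.1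
      have hc0b : cmd0 = b.1 := by
        have hle : cmd0.toList.length ≤ b.1.toList.length := by
          rcases List.mem_map.mp ((PySem.List.mem_sorted _ _ _ cmd0).mp
            (List.mem_of_find?_eq_some hc0)) with ⟨p, hp, hpc⟩
          rw [← hpc] at hc0m ⊢
          exact hbmax p hp hc0m
        have hge : b.1.toList.length ≤ cmd0.toList.length := by
          rw [hLeq] at hbmem
          rcases List.mem_append.mp hbmem with hmem | hmem
          · have := hpre b.1 hmem
            simp [hbm] at this
          rcases List.mem_cons.mp hmem with heq | hmem
          · rw [heq]
          · have hpw := PySem.List.sorted_pairwise_rev (commands.map (fun p => p.1)) (fun c => PySem.Str.len c)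
            rw [hLeq, List.pairwise_append] at hpw
            have := (List.pairwise_cons.mp hpw.2.1).1 b.1 hmem
            simp only [PySem.Str.len_eq] at this
            exact_mod_cast this
        exact pvMatch_unique hc0m hbm (by omega)
      rw [hLeq, pvLoopA_first t commands as bs cmd0 (fun c hc => by simpa using hpre c hc) hc0m,
          hc0b, hbfind]
  · simp only [Bool.not_eq_true] at hs
    simp [hs]
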